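-- pv_equiv track=rewrite | github.com/ipillyx/mam-webapp | backend/main.py | normalise_mam_cookie
-- ===== SOURCE A (Python) =====
-- def normalise_mam_cookie(raw: str) -> str:
--     if not raw:
--         return ""
--     raw = raw.strip()
--     for prefix in ("mam_id=", "mam_id =", "MAM_ID=", "MAM_ID ="):
--         if raw.startswith(prefix):
--             raw = raw[len(prefix):]
--             break
--     return raw
-- ===== SOURCE B (Python) =====
-- def normalise_mam_cookie(raw: str) -> str:
--     if not raw:
--         return ""
--     raw = raw.strip()
--     if raw[:6] in ("mam_id", "MAM_ID"):
--         rest = raw[6:]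
--         if rest[:1] == "=":
--             return rest[1:]
--         if rest[:2] == " =":
--             return rest[2:]
--     return raw
-- ===== Notes on version B (the rewrite author's own statement) =====
-- stated objective: simpler
-- what changed: Replaces the four-prefix startswith loop by a single comparison of the 6-character slice against the two case stems plus a check of the next one or two characters (equals sign, optionally preceded by one space).
import Mathlib
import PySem

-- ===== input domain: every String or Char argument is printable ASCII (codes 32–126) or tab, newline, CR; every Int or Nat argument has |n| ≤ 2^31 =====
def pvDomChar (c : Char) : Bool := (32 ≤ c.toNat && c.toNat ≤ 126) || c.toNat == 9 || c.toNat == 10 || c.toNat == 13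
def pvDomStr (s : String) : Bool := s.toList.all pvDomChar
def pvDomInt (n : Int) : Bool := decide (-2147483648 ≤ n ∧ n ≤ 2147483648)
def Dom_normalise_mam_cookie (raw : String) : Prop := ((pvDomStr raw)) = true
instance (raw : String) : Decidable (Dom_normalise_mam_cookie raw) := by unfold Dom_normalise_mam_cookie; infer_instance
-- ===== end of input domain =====

-- B replaces A's four-prefix loop by one slice comparison on the common 6-char stem plus a check of the
-- one or two characters after it (simpler: no loop, no per-prefix startswith scans); same return value.

-- ===== PORT A =====
-- the 'for prefix in (...)' loop with its break, as structural recursion over the prefix tuple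
def pvPrefixLoop (s : String) : List String → String
  | [] => s
  | p :: ps =>
    if PySem.Str.startswith s p then PySem.Str.slice s (some (PySem.Str.len p)) none
    else pvPrefixLoop s ps

def normalise_mam_cookie (raw : String) : String :=
  if raw = "" then ""
  else pvPrefixLoop (PySem.Str.strip raw) ["mam_id=", "mam_id =", "MAM_ID=", "MAM_ID ="]

-- ===== PORT B =====
def normalise_mam_cookie_alt (raw : String) : String :=
  if raw = "" then ""
  else
    let s := PySem.Str.strip raw
    if PySem.Str.slice s none (some 6) = "mam_id" ∨ PySem.Str.slice s none (some 6) = "MAM_ID" then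
      let rest := PySem.Str.slice s (some 6) none
      if PySem.Str.slice rest none (some 1) = "=" then PySem.Str.slice rest (some 1) none
      else if PySem.Str.slice rest none (some 2) = " =" then PySem.Str.slice rest (some 2) none
      else s
    else s

-- ===== PRECONDITION & SPEC =====
def Spec_normalise_mam_cookie (raw : String) (out : String) : Prop := out = normalise_mam_cookie_alt raw
instance (raw : String) (out : String) : Decidable (Spec_normalise_mam_cookie raw out) := by unfold Spec_normalise_mam_cookie; infer_instance

-- ===== CLAIM (what is proved, stated in full; the proofs are below) =====
def Claim_equal_normalise_mam_cookie : Prop := ∀ (raw : String), Dom_normalise_mam_cookie raw → Spec_normalise_mam_cookie raw (normalise_mam_cookie raw)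

-- ===== LEMMAS AND PROOFS =====

-- a concatenated pattern is a prefix iff each piece matches at its offset
theorem pv_prefix_split (l a b : List Char) :
    (a ++ b) <+: l ↔ (l.take a.length = a ∧ (l.drop a.length).take b.length = b) := by
  rw [List.prefix_iff_eq_take, List.length_append, List.take_add, eq_comm]
  constructor
  · intro h
    have hl : (l.take a.length).length = a.length := by
      have hlen := congrArg List.length h
      simp only [List.length_append, List.length_take, List.length_drop] at hlen
      simp only [List.length_take]
      omega
    exact List.append_inj h hl
  · rintro ⟨h1, h2⟩; rw [h1, h2]

theorem pv_body (s : String) :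
    pvPrefixLoop s ["mam_id=", "mam_id =", "MAM_ID=", "MAM_ID ="] =
      (if PySem.Str.slice s none (some 6) = "mam_id" ∨ PySem.Str.slice s none (some 6) = "MAM_ID" then
        if PySem.Str.slice (PySem.Str.slice s (some 6) none) none (some 1) = "=" then
          PySem.Str.slice (PySem.Str.slice s (some 6) none) (some 1) none
        else if PySem.Str.slice (PySem.Str.slice s (some 6) none) none (some 2) = " =" then
          PySem.Str.slice (PySem.Str.slice s (some 6) none) (some 2) none
        else s
      else s) := by
  -- translate every slice/startswith condition and result to take/drop facts on s.toList
  have t6 : (PySem.Str.slice s none (some 6)).toList = s.toList.take 6 := by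
    simp [PySem.Str.toList_slice, PySem.List.slice_to]
  have tr : (PySem.Str.slice s (some 6) none).toList = s.toList.drop 6 := by
    simp [PySem.Str.toList_slice, PySem.List.slice_from]
  have t1 : (PySem.Str.slice (PySem.Str.slice s (some 6) none) none (some 1)).toList
      = (s.toList.drop 6).take 1 := by
    simp [PySem.Str.toList_slice, PySem.List.slice_to, tr]
  have t2 : (PySem.Str.slice (PySem.Str.slice s (some 6) none) none (some 2)).toList
      = (s.toList.drop 6).take 2 := by
    simp [PySem.Str.toList_slice, PySem.List.slice_to, tr]
  have c6m : (PySem.Str.slice s none (some 6) = "mam_id") ↔ s.toList.take 6 = "mam_id".toList := by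
    rw [← String.toList_inj, t6]
  have c6M : (PySem.Str.slice s none (some 6) = "MAM_ID") ↔ s.toList.take 6 = "MAM_ID".toList := by
    rw [← String.toList_inj, t6]
  have c1 : (PySem.Str.slice (PySem.Str.slice s (some 6) none) none (some 1) = "=")
      ↔ (s.toList.drop 6).take 1 = "=".toList := by
    rw [← String.toList_inj, t1]
  have c2 : (PySem.Str.slice (PySem.Str.slice s (some 6) none) none (some 2) = " =")
      ↔ (s.toList.drop 6).take 2 = " =".toList := by
    rw [← String.toList_inj, t2]
  have p1 : PySem.Str.startswith s "mam_id=" = true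
      ↔ (s.toList.take 6 = "mam_id".toList ∧ (s.toList.drop 6).take 1 = "=".toList) := by
    rw [PySem.Str.startswith_eq, PySem.Chars.startswith_iff,
        show ("mam_id=".toList : List Char) = "mam_id".toList ++ "=".toList from by decide,
        pv_prefix_split, show ("mam_id".toList).length = 6 from by decide,
        show ("=".toList : List Char).length = 1 from by decide]
  have p2 : PySem.Str.startswith s "mam_id =" = true
      ↔ (s.toList.take 6 = "mam_id".toList ∧ (s.toList.drop 6).take 2 = " =".toList) := by
    rw [PySem.Str.startswith_eq, PySem.Chars.startswith_iff,
        show ("mam_id =".toList : List Char) = "mam_id".toList ++ " =".toList from by decide,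
        pv_prefix_split, show ("mam_id".toList).length = 6 from by decide,
        show (" =".toList : List Char).length = 2 from by decide]
  have p3 : PySem.Str.startswith s "MAM_ID=" = true
      ↔ (s.toList.take 6 = "MAM_ID".toList ∧ (s.toList.drop 6).take 1 = "=".toList) := by
    rw [PySem.Str.startswith_eq, PySem.Chars.startswith_iff,
        show ("MAM_ID=".toList : List Char) = "MAM_ID".toList ++ "=".toList from by decide,
        pv_prefix_split, show ("MAM_ID".toList).length = 6 from by decide,
        show ("=".toList : List Char).length = 1 from by decide]
  have p4 : PySem.Str.startswith s "MAM_ID =" = true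
      ↔ (s.toList.take 6 = "MAM_ID".toList ∧ (s.toList.drop 6).take 2 = " =".toList) := by
    rw [PySem.Str.startswith_eq, PySem.Chars.startswith_iff,
        show ("MAM_ID =".toList : List Char) = "MAM_ID".toList ++ " =".toList from by decide,
        pv_prefix_split, show ("MAM_ID".toList).length = 6 from by decide,
        show (" =".toList : List Char).length = 2 from by decide]
  have e1 : PySem.Str.slice s (some 7) none
        = PySem.Str.slice (PySem.Str.slice s (some 6) none) (some 1) none := by
    rw [← String.toList_inj]
    simp [PySem.Str.toList_slice, PySem.List.slice_from, tr]
  have e2 : PySem.Str.slice s (some 8) none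
        = PySem.Str.slice (PySem.Str.slice s (some 6) none) (some 2) none := by
    rw [← String.toList_inj]
    simp [PySem.Str.toList_slice, PySem.List.slice_from, tr]
  have hx : ¬ ((s.toList.drop 6).take 1 = "=".toList ∧ (s.toList.drop 6).take 2 = " =".toList) := by
    rintro ⟨h1, h2⟩
    have h := List.take_take (i := 1) (j := 2) (l := s.toList.drop 6)
    rw [h2, show min 1 2 = 1 from rfl, h1] at h
    exact absurd h (by decide)
  by_cases hm : s.toList.take 6 = "mam_id".toList <;>
    by_cases hM : s.toList.take 6 = "MAM_ID".toList <;>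
      by_cases h1 : (s.toList.drop 6).take 1 = "=".toList <;>
        by_cases h2 : (s.toList.drop 6).take 2 = " =".toList <;>
          simp_all [pvPrefixLoop]

-- ===== VERDICT (by name: the statement is the Claim_ definition above) =====
theorem normalise_mam_cookie_spec : Claim_equal_normalise_mam_cookie := by
  intro raw _
  unfold Spec_normalise_mam_cookie normalise_mam_cookie normalise_mam_cookie_alt
  by_cases h : raw = ""
  · simp [h]
  · simp only [h, if_false, pv_body]
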